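-- pv_equiv track=rewrite | github.com/Benny7075/GameTheory | AI.py | remove_unconnected_nodes
-- ===== SOURCE A (Python) =====
-- def dfs1(graph, node, visited):
--     visited.add(node)
--     for neighbor in graph[node]:
--         if neighbor not in visited:
--             dfs1(graph, neighbor, visited)
--
-- def remove_unconnected_nodes(nodes, lines, roots):
--     # Create an adjacency list representation of the graph
--     graph = {node: [] for node in nodes}
--     for line in lines:
--         graph[line[0]].append(line[1])
--         graph[line[1]].append(line[0])
--
--     # Perform DFS starting from each root node
--     visited = set()
--     for root in roots:
--         if root not in visited:
--             dfs1(graph, root, visited)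
--
--     # Filter nodes and lines based on visited nodes
--     connected_nodes = [node for node in nodes if node in visited]
--     connected_lines = [line for line in lines if line[0] in visited and line[1] in visited]
--
--     return connected_nodes, connected_lines
-- ===== SOURCE B (Python) =====
-- def remove_unconnected_nodes(nodes, lines, roots):
--     # Create an adjacency list representation of the graph
--     graph = {node: [] for node in nodes}
--     for line in lines:
--         graph[line[0]].append(line[1])
--         graph[line[1]].append(line[0])
--
--     # Iterative traversal with an explicit worklist instead of a recursive helper
--     visited = set()
--     for root in roots:
--         if root not in visited:
--             stack = [root]
--             while stack:
--                 node = stack.pop()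
--                 if node not in visited:
--                     visited.add(node)
--                     stack.extend(graph[node])
--
--     # Filter nodes and lines based on visited nodes
--     connected_nodes = [node for node in nodes if node in visited]
--     connected_lines = [line for line in lines if line[0] in visited and line[1] in visited]
--
--     return connected_nodes, connected_lines
-- ===== Notes on version B (the rewrite author's own statement) =====
-- stated objective: simpler
-- what changed: The recursive dfs1 helper is replaced by an inline iterative depth-first traversal using an explicit stack (pop a node, mark it visited, push its neighbours); the adjacency-list build and the two output filters are unchanged.
import Mathlib
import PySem

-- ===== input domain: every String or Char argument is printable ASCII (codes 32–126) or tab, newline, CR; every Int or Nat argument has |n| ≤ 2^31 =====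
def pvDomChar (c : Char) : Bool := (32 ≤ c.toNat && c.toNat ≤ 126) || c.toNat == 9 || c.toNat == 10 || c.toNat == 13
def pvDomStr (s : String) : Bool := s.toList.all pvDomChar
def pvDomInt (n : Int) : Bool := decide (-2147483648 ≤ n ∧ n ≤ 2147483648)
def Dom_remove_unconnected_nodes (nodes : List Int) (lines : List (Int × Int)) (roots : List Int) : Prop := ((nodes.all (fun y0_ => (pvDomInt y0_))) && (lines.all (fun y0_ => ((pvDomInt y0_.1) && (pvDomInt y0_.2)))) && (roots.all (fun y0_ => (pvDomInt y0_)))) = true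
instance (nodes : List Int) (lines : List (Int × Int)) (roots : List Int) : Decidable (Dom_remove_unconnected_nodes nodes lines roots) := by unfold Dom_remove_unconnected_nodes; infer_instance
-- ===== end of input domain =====

-- B replaces the recursive dfs1 helper by an inline iterative stack traversal (same graph build,
-- same output filters); equivalence is about the return value (neither Python mutates its arguments).

-- ===== PORT A =====
-- shared helper: the adjacency-list build, identical lines of both Pythons
-- ('graph[k].append(v)' is ported as 'modify k [] (· ++ [v])': exact when k is a key; on a missing
-- key Python raises KeyError — those inputs are excluded by Pre_ below)
def pvBuildGraph (nodes : List Int) (lines : List (Int × Int)) : PySem.Dict Int (List Int) :=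
  lines.foldl
    (fun g l => (g.modify l.1 [] (fun a => a ++ [l.2])).modify l.2 [] (fun a => a ++ [l.1]))
    (nodes.foldl (fun g n => g.insert n ([] : List Int)) PySem.Dict.empty)

-- number of graph keys not yet visited: recursion-depth bound for A's dfs1 and
-- termination measure for B's while loop
def pvUnvis (g : PySem.Dict Int (List Int)) (v : PySem.Set Int) : Nat :=
  (g.keys.filter (fun k => !(PySem.Set.contains v k))).length

lemma pv_contains_false (v : PySem.Set Int) (x : Int) :
    PySem.Set.contains v x = false ↔ x ∉ v := by
  rw [← Bool.not_eq_true, PySem.Set.contains_iff]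

lemma pv_filter_le (l : List Int) (p q : Int → Bool) (h : ∀ a ∈ l, q a = true → p a = true) :
    (l.filter q).length ≤ (l.filter p).length := by
  induction l with
  | nil => simp
  | cons a t ih =>
    have ht := ih (fun b hb => h b (List.mem_cons_of_mem _ hb))
    cases hqa : q a
    · cases hpa : p a <;> simp [hqa, hpa] <;> omega
    · simp [hqa, h a List.mem_cons_self hqa]
      omega

lemma pv_filter_lt (l : List Int) (p q : Int → Bool) (h : ∀ a ∈ l, q a = true → p a = true)
    (x : Int) (hx : x ∈ l) (hp : p x = true) (hq : q x = false) :
    (l.filter q).length < (l.filter p).length := by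
  induction l with
  | nil => cases hx
  | cons a t ih =>
    rcases List.mem_cons.1 hx with rfl | hx
    · have hle := pv_filter_le t p q (fun b hb hqb => h b (List.mem_cons_of_mem _ hb) hqb)
      simp [hp, hq]
      omega
    · have hlt := ih (fun b hb => h b (List.mem_cons_of_mem _ hb)) hx
      cases hqa : q a
      · cases hpa : p a <;> simp [hqa, hpa] <;> omega
      · simp [hqa, h a List.mem_cons_self hqa]
        omega

lemma pvUnvis_add_lt (g : PySem.Dict Int (List Int)) (v : PySem.Set Int) (x : Int)
    (hk : x ∈ g.keys) (hx : x ∉ v) :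
    pvUnvis g (PySem.Set.add v x) < pvUnvis g v := by
  refine pv_filter_lt _ _ _ (fun a _ ha => ?_) x hk ?_ ?_
  · rw [Bool.not_eq_true'] at ha ⊢
    rw [pv_contains_false] at ha ⊢
    exact fun hav => ha ((PySem.Set.mem_add _ _ _).2 (Or.inl hav))
  · rw [Bool.not_eq_true', pv_contains_false]; exact hx
  · simp

lemma pvUnvis_add_eq_of_not_key (g : PySem.Dict Int (List Int)) (v : PySem.Set Int) (x : Int)
    (hk : x ∉ g.keys) :
    pvUnvis g (PySem.Set.add v x) = pvUnvis g v := by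
  unfold pvUnvis
  congr 1
  refine List.filter_congr (fun a ha => ?_)
  have hax : a ≠ x := fun h => hk (h ▸ ha)
  congr 1
  rw [Bool.eq_iff_iff, PySem.Set.contains_iff, PySem.Set.contains_iff, PySem.Set.mem_add _ _ _]
  constructor
  · rintro (h | rfl)
    · exact h
    · exact absurd rfl hax
  · exact Or.inl

-- port of A's recursive dfs1; the Nat argument is a fuel bound on the recursion depth
-- (pvUnvis shrinks at every recursive call, so fuel = number of keys is always enough);
-- a node absent from graph is where Python raises KeyError (excluded by Pre_)
mutual
def pvDfsA (g : PySem.Dict Int (List Int)) : Nat → Int → PySem.Set Int → PySem.Set Int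
  | 0, node, visited => PySem.Set.add visited node
  | (fuel+1), node, visited => pvDfsAList g fuel (g.getD node []) (PySem.Set.add visited node)
termination_by fuel _ _ => (fuel, 0)
def pvDfsAList (g : PySem.Dict Int (List Int)) : Nat → List Int → PySem.Set Int → PySem.Set Int
  | _, [], visited => visited
  | fuel, nb :: rest, visited =>
      if PySem.Set.contains visited nb then pvDfsAList g fuel rest visited
      else pvDfsAList g fuel rest (pvDfsA g fuel nb visited)
termination_by fuel nbs _ => (fuel, nbs.length + 1)
end

def remove_unconnected_nodes (nodes : List Int) (lines : List (Int × Int)) (roots : List Int) :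
    List Int × (List (Int × Int)) :=
  let graph := pvBuildGraph nodes lines
  let visited := roots.foldl
    (fun v root => if PySem.Set.contains v root then v else pvDfsA graph graph.size root v)
    (PySem.Set.empty : PySem.Set Int)
  (nodes.filter (fun node => PySem.Set.contains visited node),
   lines.filter (fun l => PySem.Set.contains visited l.1 && PySem.Set.contains visited l.2))

-- ===== PORT B =====
-- the while loop over the explicit stack (list head = top of stack; Python's pop() takes the
-- last pushed element, so extend(graph[node]) prepends the reversed adjacency list here)
def pvStackLoop (g : PySem.Dict Int (List Int)) (stack : List Int) (visited : PySem.Set Int) :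
    PySem.Set Int :=
  match stack with
  | [] => visited
  | node :: rest =>
      if PySem.Set.contains visited node then pvStackLoop g rest visited
      else pvStackLoop g ((g.getD node []).reverse ++ rest) (PySem.Set.add visited node)
termination_by (pvUnvis g visited, stack.length)
decreasing_by
  · exact Prod.Lex.right _ (Nat.lt_succ_self _)
  · rename_i hnv
    by_cases hk : node ∈ g.keys
    · exact Prod.Lex.left _ _
        (pvUnvis_add_lt g visited node hk ((pv_contains_false _ _).1 (by simpa using hnv)))
    · have hc : g.contains node = false := by
        cases hcb : g.contains node
        · rfl
        · exact absurd ((PySem.Dict.contains_iff_mem_keys _ _).1 hcb) hk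
      have hgd : g.getD node ([] : List Int) = [] :=
        PySem.Dict.getD_of_not_contains g ([] : List Int) hc
      rw [pvUnvis_add_eq_of_not_key g visited node hk, hgd]
      exact Prod.Lex.right _ (by simp)

def remove_unconnected_nodes_alt (nodes : List Int) (lines : List (Int × Int)) (roots : List Int) :
    List Int × (List (Int × Int)) :=
  let graph := pvBuildGraph nodes lines
  let visited := roots.foldl
    (fun v root => if PySem.Set.contains v root then v else pvStackLoop graph [root] v)
    (PySem.Set.empty : PySem.Set Int)
  (nodes.filter (fun node => PySem.Set.contains visited node),
   lines.filter (fun l => PySem.Set.contains visited l.1 && PySem.Set.contains visited l.2))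

-- ===== PRECONDITION & SPEC =====
-- Pre_ excludes exactly the inputs on which both Pythons raise KeyError while building or
-- traversing the graph: a line endpoint or a root that is not in nodes.
def Pre_remove_unconnected_nodes (nodes : List Int) (lines : List (Int × Int)) (roots : List Int) : Prop :=
  (∀ l ∈ lines, l.1 ∈ nodes ∧ l.2 ∈ nodes) ∧ (∀ r ∈ roots, r ∈ nodes)
instance (nodes : List Int) (lines : List (Int × Int)) (roots : List Int) : Decidable (Pre_remove_unconnected_nodes nodes lines roots) := by unfold Pre_remove_unconnected_nodes; infer_instance

def pvWitness_remove_unconnected_nodes : List Int × (List (Int × Int)) × List Int :=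
  ([1, 2, 3, 4], [(1, 2), (3, 3)], [1, 3])

def Spec_remove_unconnected_nodes (nodes : List Int) (lines : List (Int × Int)) (roots : List Int) (out : List Int × (List (Int × Int))) : Prop := out = remove_unconnected_nodes_alt nodes lines roots
instance (nodes : List Int) (lines : List (Int × Int)) (roots : List Int) (out : List Int × (List (Int × Int))) : Decidable (Spec_remove_unconnected_nodes nodes lines roots out) := by unfold Spec_remove_unconnected_nodes; infer_instance

-- ===== CLAIM (what is proved, stated in full; the proofs are below) =====
def Claim_equal_remove_unconnected_nodes : Prop := ∀ (nodes : List Int) (lines : List (Int × Int)) (roots : List Int), Dom_remove_unconnected_nodes nodes lines roots → Pre_remove_unconnected_nodes nodes lines roots → Spec_remove_unconnected_nodes nodes lines roots (remove_unconnected_nodes nodes lines roots)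

-- ===== LEMMAS AND PROOFS =====

-- reachability along adjacency lists: the semantic characterisation both traversals satisfy
inductive pvReach (g : PySem.Dict Int (List Int)) : Int → Int → Prop
  | refl (a : Int) : pvReach g a a
  | step {a b c : Int} : pvReach g a b → c ∈ g.getD b [] → pvReach g a c

lemma pvReach_head (g : PySem.Dict Int (List Int)) {n s x : Int}
    (hs : s ∈ g.getD n []) (h : pvReach g s x) : pvReach g n x := by
  induction h with
  | refl => exact pvReach.step (pvReach.refl n) hs
  | step _ hc ih => exact pvReach.step ih hc

-- closed graph: every entry of an adjacency list is itself a key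
def pvClosedG (g : PySem.Dict Int (List Int)) : Prop :=
  ∀ k x, x ∈ g.getD k [] → x ∈ g.keys

lemma pvUnvis_anti (g : PySem.Dict Int (List Int)) {v w : PySem.Set Int} (h : v ⊆ w) :
    pvUnvis g w ≤ pvUnvis g v := by
  refine pv_filter_le _ _ _ (fun a _ haw => ?_)
  rw [Bool.not_eq_true'] at haw ⊢
  rw [pv_contains_false] at haw ⊢
  exact fun hav => haw (h hav)

lemma pvUnvis_le_size (g : PySem.Dict Int (List Int)) (v : PySem.Set Int) :
    pvUnvis g v ≤ g.size := by
  unfold pvUnvis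
  have h := List.length_filter_le (fun k => !(PySem.Set.contains v k)) g.keys
  simpa [PySem.Dict.keys, PySem.Dict.size] using h

-- ---- A-side lemmas (fuel induction: the AList-part at fuel f uses the A-part at f,
-- and the A-part at f+1 uses the AList-part at f) ----

lemma pvUnvis_eq_zero (g : PySem.Dict Int (List Int)) (v : PySem.Set Int)
    (h : pvUnvis g v = 0) : ∀ k ∈ g.keys, k ∈ v := by
  intro k hk
  unfold pvUnvis at h
  rw [List.length_eq_zero_iff] at h
  have hf := List.filter_eq_nil_iff.1 h k hk
  cases hcb : PySem.Set.contains v k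
  · exact absurd (by rw [hcb]; simp) hf
  · exact (PySem.Set.contains_iff _ _).1 hcb

lemma pvDfsAList_mono_of (g : PySem.Dict Int (List Int)) (fuel : Nat)
    (hA : ∀ node v, v ⊆ pvDfsA g fuel node v ∧ node ∈ pvDfsA g fuel node v) :
    ∀ nbs v, v ⊆ pvDfsAList g fuel nbs v ∧ ∀ nb ∈ nbs, nb ∈ pvDfsAList g fuel nbs v := by
  intro nbs
  induction nbs with
  | nil => intro v; exact ⟨by simp [pvDfsAList], by simp⟩
  | cons nb rest ih =>
    intro v
    by_cases hc : PySem.Set.contains v nb = true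
    · rw [show pvDfsAList g fuel (nb :: rest) v = pvDfsAList g fuel rest v from by
        simp only [pvDfsAList]; rw [if_pos hc]]
      refine ⟨(ih v).1, fun x hx => ?_⟩
      rcases List.mem_cons.1 hx with rfl | hx'
      · exact (ih v).1 ((PySem.Set.contains_iff _ _).1 hc)
      · exact (ih v).2 x hx'
    · rw [show pvDfsAList g fuel (nb :: rest) v = pvDfsAList g fuel rest (pvDfsA g fuel nb v) from by
        simp only [pvDfsAList]; rw [if_neg hc]]
      refine ⟨fun a ha => (ih _).1 ((hA nb v).1 ha), fun x hx => ?_⟩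
      rcases List.mem_cons.1 hx with rfl | hx'
      · exact (ih _).1 (hA x v).2
      · exact (ih _).2 x hx'

lemma pvDfsA_mono (g : PySem.Dict Int (List Int)) : ∀ fuel : Nat,
    (∀ node v, v ⊆ pvDfsA g fuel node v ∧ node ∈ pvDfsA g fuel node v) ∧
    (∀ nbs v, v ⊆ pvDfsAList g fuel nbs v ∧ ∀ nb ∈ nbs, nb ∈ pvDfsAList g fuel nbs v) := by
  intro fuel
  induction fuel with
  | zero =>
    have hA : ∀ node v, v ⊆ pvDfsA g 0 node v ∧ node ∈ pvDfsA g 0 node v := by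
      intro node v
      rw [show pvDfsA g 0 node v = PySem.Set.add v node from by simp [pvDfsA]]
      exact ⟨fun a ha => (PySem.Set.mem_add _ _ _).2 (Or.inl ha),
             (PySem.Set.mem_add _ _ _).2 (Or.inr rfl)⟩
    exact ⟨hA, pvDfsAList_mono_of g 0 hA⟩
  | succ n ihn =>
    have hA : ∀ node v, v ⊆ pvDfsA g (n+1) node v ∧ node ∈ pvDfsA g (n+1) node v := by
      intro node v
      rw [show pvDfsA g (n+1) node v
            = pvDfsAList g n (g.getD node []) (PySem.Set.add v node) from by simp [pvDfsA]]
      exact ⟨fun a ha => (ihn.2 _ _).1 ((PySem.Set.mem_add _ _ _).2 (Or.inl ha)),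
             (ihn.2 _ _).1 ((PySem.Set.mem_add _ _ _).2 (Or.inr rfl))⟩
    exact ⟨hA, pvDfsAList_mono_of g (n+1) hA⟩

lemma pvDfsAList_sound_of (g : PySem.Dict Int (List Int)) (fuel : Nat)
    (hA : ∀ node v x, x ∈ pvDfsA g fuel node v → x ∈ v ∨ pvReach g node x) :
    ∀ nbs v x, x ∈ pvDfsAList g fuel nbs v → x ∈ v ∨ ∃ nb ∈ nbs, pvReach g nb x := by
  intro nbs
  induction nbs with
  | nil => intro v x hx; exact Or.inl (by simpa [pvDfsAList] using hx)
  | cons nb rest ih =>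
    intro v x hx
    by_cases hc : PySem.Set.contains v nb = true
    · rw [show pvDfsAList g fuel (nb :: rest) v = pvDfsAList g fuel rest v from by
        simp only [pvDfsAList]; rw [if_pos hc]] at hx
      rcases ih v x hx with h | ⟨s, hs, hr⟩
      · exact Or.inl h
      · exact Or.inr ⟨s, List.mem_cons_of_mem _ hs, hr⟩
    · rw [show pvDfsAList g fuel (nb :: rest) v = pvDfsAList g fuel rest (pvDfsA g fuel nb v) from by
        simp only [pvDfsAList]; rw [if_neg hc]] at hx
      rcases ih _ x hx with h | ⟨s, hs, hr⟩
      · rcases hA nb v x h with h' | hr'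
        · exact Or.inl h'
        · exact Or.inr ⟨nb, List.mem_cons_self, hr'⟩
      · exact Or.inr ⟨s, List.mem_cons_of_mem _ hs, hr⟩

lemma pvDfsA_sound (g : PySem.Dict Int (List Int)) : ∀ fuel : Nat,
    (∀ node v x, x ∈ pvDfsA g fuel node v → x ∈ v ∨ pvReach g node x) ∧
    (∀ nbs v x, x ∈ pvDfsAList g fuel nbs v → x ∈ v ∨ ∃ nb ∈ nbs, pvReach g nb x) := by
  intro fuel
  induction fuel with
  | zero =>
    have hA : ∀ node v x, x ∈ pvDfsA g 0 node v → x ∈ v ∨ pvReach g node x := by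
      intro node v x hx
      rw [show pvDfsA g 0 node v = PySem.Set.add v node from by simp [pvDfsA]] at hx
      rcases (PySem.Set.mem_add _ _ _).1 hx with h | rfl
      · exact Or.inl h
      · exact Or.inr (pvReach.refl _)
    exact ⟨hA, pvDfsAList_sound_of g 0 hA⟩
  | succ n ihn =>
    have hA : ∀ node v x, x ∈ pvDfsA g (n+1) node v → x ∈ v ∨ pvReach g node x := by
      intro node v x hx
      rw [show pvDfsA g (n+1) node v
            = pvDfsAList g n (g.getD node []) (PySem.Set.add v node) from by simp [pvDfsA]] at hx
      rcases ihn.2 _ _ x hx with h | ⟨s, hs, hr⟩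
      · rcases (PySem.Set.mem_add _ _ _).1 h with h' | rfl
        · exact Or.inl h'
        · exact Or.inr (pvReach.refl _)
      · exact Or.inr (pvReach_head g hs hr)
    exact ⟨hA, pvDfsAList_sound_of g (n+1) hA⟩

lemma pvDfsAList_closed_of (g : PySem.Dict Int (List Int)) (fuel : Nat)
    (hA : ∀ node v, pvUnvis g (PySem.Set.add v node) ≤ fuel →
      ∀ x ∈ pvDfsA g fuel node v, x ∈ v ∨ ∀ y ∈ g.getD x [], y ∈ pvDfsA g fuel node v) :
    ∀ nbs v, (∀ nb ∈ nbs, nb ∈ g.keys) → pvUnvis g v ≤ fuel + 1 →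
      ∀ x ∈ pvDfsAList g fuel nbs v, x ∈ v ∨ ∀ y ∈ g.getD x [], y ∈ pvDfsAList g fuel nbs v := by
  intro nbs
  induction nbs with
  | nil =>
    intro v _ _ x hx
    exact Or.inl (by simpa [pvDfsAList] using hx)
  | cons nb rest ih =>
    intro v hkeys hv x hx
    by_cases hc : PySem.Set.contains v nb = true
    · rw [show pvDfsAList g fuel (nb :: rest) v = pvDfsAList g fuel rest v from by
        simp only [pvDfsAList]; rw [if_pos hc]] at hx ⊢
      exact ih v (fun b hb => hkeys b (List.mem_cons_of_mem _ hb)) hv x hx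
    · have hnbv : nb ∉ v := (pv_contains_false _ _).1 (by
        cases hcb : PySem.Set.contains v nb
        · rfl
        · exact absurd hcb hc)
      have hlt : pvUnvis g (PySem.Set.add v nb) < pvUnvis g v :=
        pvUnvis_add_lt g v nb (hkeys nb List.mem_cons_self) hnbv
      have hfuel' : pvUnvis g (PySem.Set.add v nb) ≤ fuel := by omega
      have hsub : PySem.Set.add v nb ⊆ pvDfsA g fuel nb v := by
        intro a ha
        rcases (PySem.Set.mem_add _ _ _).1 ha with h | rfl
        · exact ((pvDfsA_mono g fuel).1 nb v).1 h
        · exact ((pvDfsA_mono g fuel).1 a v).2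
      have hv' : pvUnvis g (pvDfsA g fuel nb v) ≤ fuel + 1 :=
        le_trans (pvUnvis_anti g hsub) (le_trans (le_of_lt hlt) hv)
      rw [show pvDfsAList g fuel (nb :: rest) v = pvDfsAList g fuel rest (pvDfsA g fuel nb v) from by
        simp only [pvDfsAList]; rw [if_neg hc]] at hx ⊢
      rcases ih (pvDfsA g fuel nb v) (fun b hb => hkeys b (List.mem_cons_of_mem _ hb)) hv' x hx
        with h | hcl
      · rcases hA nb v hfuel' x h with h' | hcl'
        · exact Or.inl h'
        · exact Or.inr (fun y hy =>
            ((pvDfsA_mono g fuel).2 rest (pvDfsA g fuel nb v)).1 (hcl' y hy))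
      · exact Or.inr hcl

lemma pvDfsA_closed (g : PySem.Dict Int (List Int)) (hg : pvClosedG g) : ∀ fuel : Nat,
    (∀ node v, pvUnvis g (PySem.Set.add v node) ≤ fuel →
      ∀ x ∈ pvDfsA g fuel node v, x ∈ v ∨ ∀ y ∈ g.getD x [], y ∈ pvDfsA g fuel node v) ∧
    (∀ nbs v, (∀ nb ∈ nbs, nb ∈ g.keys) → pvUnvis g v ≤ fuel + 1 →
      ∀ x ∈ pvDfsAList g fuel nbs v, x ∈ v ∨ ∀ y ∈ g.getD x [], y ∈ pvDfsAList g fuel nbs v) := by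
  intro fuel
  induction fuel with
  | zero =>
    have hA : ∀ node v, pvUnvis g (PySem.Set.add v node) ≤ 0 →
        ∀ x ∈ pvDfsA g 0 node v, x ∈ v ∨ ∀ y ∈ g.getD x [], y ∈ pvDfsA g 0 node v := by
      intro node v hfuel x hx
      rw [show pvDfsA g 0 node v = PySem.Set.add v node from by simp [pvDfsA]] at hx ⊢
      rcases (PySem.Set.mem_add _ _ _).1 hx with h | rfl
      · exact Or.inl h
      · refine Or.inr (fun y hy => ?_)
        exact pvUnvis_eq_zero g _ (Nat.le_zero.1 hfuel) y (hg x y hy)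
    exact ⟨hA, pvDfsAList_closed_of g 0 hA⟩
  | succ n ihn =>
    have hA : ∀ node v, pvUnvis g (PySem.Set.add v node) ≤ n + 1 →
        ∀ x ∈ pvDfsA g (n+1) node v, x ∈ v ∨ ∀ y ∈ g.getD x [], y ∈ pvDfsA g (n+1) node v := by
      intro node v hfuel x hx
      rw [show pvDfsA g (n+1) node v
            = pvDfsAList g n (g.getD node []) (PySem.Set.add v node) from by simp [pvDfsA]] at hx ⊢
      have hkeys : ∀ nb ∈ g.getD node [], nb ∈ g.keys := fun nb hnb => hg node nb hnb
      rcases ihn.2 (g.getD node []) (PySem.Set.add v node) hkeys hfuel x hx with h | hcl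
      · rcases (PySem.Set.mem_add _ _ _).1 h with h' | rfl
        · exact Or.inl h'
        · exact Or.inr (fun y hy =>
            ((pvDfsA_mono g n).2 (g.getD x []) (PySem.Set.add v x)).2 y hy)
      · exact Or.inr hcl
    exact ⟨hA, pvDfsAList_closed_of g (n+1) hA⟩

-- ---- B-side lemmas (by functional induction on the stack loop) ----

lemma pvStackLoop_mono (g : PySem.Dict Int (List Int)) (stack : List Int) (v : PySem.Set Int) :
    v ⊆ pvStackLoop g stack v := by
  fun_induction pvStackLoop g stack v with
  | case1 v => exact fun a ha => ha
  | case2 v node rest hc ih => exact ih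
  | case3 v node rest hc ih =>
    exact fun a ha => ih ((PySem.Set.mem_add _ _ _).2 (Or.inl ha))

lemma pvStackLoop_stack (g : PySem.Dict Int (List Int)) (stack : List Int) (v : PySem.Set Int) :
    ∀ s ∈ stack, s ∈ pvStackLoop g stack v := by
  fun_induction pvStackLoop g stack v with
  | case1 v => intro s hs; cases hs
  | case2 v node rest hc ih =>
    intro s hs
    rcases List.mem_cons.1 hs with rfl | hs'
    · exact pvStackLoop_mono g rest v ((PySem.Set.contains_iff _ _).1 hc)
    · exact ih s hs'
  | case3 v node rest hc ih =>
    intro s hs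
    rcases List.mem_cons.1 hs with rfl | hs'
    · exact pvStackLoop_mono g _ _ ((PySem.Set.mem_add _ _ _).2 (Or.inr rfl))
    · exact ih s (List.mem_append_right _ hs')

lemma pvStackLoop_sound (g : PySem.Dict Int (List Int)) (stack : List Int) (v : PySem.Set Int) :
    ∀ x ∈ pvStackLoop g stack v, x ∈ v ∨ ∃ s ∈ stack, pvReach g s x := by
  fun_induction pvStackLoop g stack v with
  | case1 v => exact fun x hx => Or.inl hx
  | case2 v node rest hc ih =>
    intro x hx
    rcases ih x hx with h | ⟨s, hs, hr⟩
    · exact Or.inl h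
    · exact Or.inr ⟨s, List.mem_cons_of_mem _ hs, hr⟩
  | case3 v node rest hc ih =>
    intro x hx
    rcases ih x hx with h | ⟨s, hs, hr⟩
    · rcases (PySem.Set.mem_add _ _ _).1 h with h' | rfl
      · exact Or.inl h'
      · exact Or.inr ⟨_, List.mem_cons_self, pvReach.refl _⟩
    · rcases List.mem_append.1 hs with hs' | hs'
      · exact Or.inr ⟨node, List.mem_cons_self, pvReach_head g (List.mem_reverse.1 hs') hr⟩
      · exact Or.inr ⟨s, List.mem_cons_of_mem _ hs', hr⟩

lemma pvStackLoop_closed (g : PySem.Dict Int (List Int)) (stack : List Int) (v : PySem.Set Int) :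
    ∀ x ∈ pvStackLoop g stack v, x ∈ v ∨ ∀ y ∈ g.getD x [], y ∈ pvStackLoop g stack v := by
  fun_induction pvStackLoop g stack v with
  | case1 v => exact fun x hx => Or.inl hx
  | case2 v node rest hc ih => exact ih
  | case3 v node rest hc ih =>
    intro x hx
    rcases ih x hx with h | hcl
    · rcases (PySem.Set.mem_add _ _ _).1 h with h' | rfl
      · exact Or.inl h'
      · refine Or.inr (fun y hy => ?_)
        exact pvStackLoop_stack g _ _ y (List.mem_append_left _ (List.mem_reverse.2 hy))
    · exact Or.inr hcl

-- ---- characterisation of the root folds ----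

lemma pvFold_mono (F : PySem.Set Int → Int → PySem.Set Int)
    (hmono : ∀ v r, v ⊆ F v r) :
    ∀ (roots : List Int) (acc : PySem.Set Int), acc ⊆ roots.foldl F acc := by
  intro roots
  induction roots with
  | nil => exact fun acc a ha => ha
  | cons r rest ih => exact fun acc a ha => ih (F acc r) (hmono acc r ha)

lemma pvFold_self (F : PySem.Set Int → Int → PySem.Set Int)
    (hmono : ∀ v r, v ⊆ F v r) (hself : ∀ v r, r ∈ F v r) :
    ∀ (roots : List Int) (acc : PySem.Set Int), ∀ r ∈ roots, r ∈ roots.foldl F acc := by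
  intro roots
  induction roots with
  | nil => intro acc r hr; cases hr
  | cons a rest ih =>
    intro acc r hr
    rcases List.mem_cons.1 hr with rfl | hr'
    · exact pvFold_mono F hmono rest (F acc r) (hself acc r)
    · exact ih (F acc a) r hr'

lemma pvFold_closed (g : PySem.Dict Int (List Int)) (F : PySem.Set Int → Int → PySem.Set Int)
    (hmono : ∀ v r, v ⊆ F v r)
    (hclosed : ∀ v r x, x ∈ F v r → x ∈ v ∨ ∀ y ∈ g.getD x [], y ∈ F v r) :
    ∀ (roots : List Int) (acc : PySem.Set Int),
      (∀ x ∈ acc, ∀ y ∈ g.getD x [], y ∈ acc) →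
      ∀ x ∈ roots.foldl F acc, ∀ y ∈ g.getD x [], y ∈ roots.foldl F acc := by
  intro roots
  induction roots with
  | nil => exact fun acc hacc => hacc
  | cons r rest ih =>
    intro acc hacc
    refine ih (F acc r) ?_
    intro x hx y hy
    rcases hclosed acc r x hx with h | hcl
    · exact hmono acc r (hacc x h y hy)
    · exact hcl y hy

lemma pvFold_sound (g : PySem.Dict Int (List Int)) (F : PySem.Set Int → Int → PySem.Set Int)
    (hsound : ∀ v r x, x ∈ F v r → x ∈ v ∨ pvReach g r x) :
    ∀ (roots : List Int) (acc : PySem.Set Int) (x : Int),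
      x ∈ roots.foldl F acc → x ∈ acc ∨ ∃ r ∈ roots, pvReach g r x := by
  intro roots
  induction roots with
  | nil => exact fun acc x hx => Or.inl hx
  | cons r rest ih =>
    intro acc x hx
    rcases ih (F acc r) x hx with h | ⟨s, hs, hr⟩
    · rcases hsound acc r x h with h' | hr'
      · exact Or.inl h'
      · exact Or.inr ⟨r, List.mem_cons_self, hr'⟩
    · exact Or.inr ⟨s, List.mem_cons_of_mem _ hs, hr⟩

lemma pvFold_mem (g : PySem.Dict Int (List Int)) (F : PySem.Set Int → Int → PySem.Set Int)
    (hmono : ∀ v r, v ⊆ F v r)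
    (hself : ∀ v r, r ∈ F v r)
    (hsound : ∀ v r x, x ∈ F v r → x ∈ v ∨ pvReach g r x)
    (hclosed : ∀ v r x, x ∈ F v r → x ∈ v ∨ ∀ y ∈ g.getD x [], y ∈ F v r) :
    ∀ (roots : List Int) (x : Int),
      x ∈ roots.foldl F PySem.Set.empty ↔ ∃ r ∈ roots, pvReach g r x := by
  intro roots x
  constructor
  · intro hx
    rcases pvFold_sound g F hsound roots PySem.Set.empty x hx with h | h
    · cases h
    · exact h
  · rintro ⟨r, hr, hreach⟩
    induction hreach with
    | refl => exact pvFold_self F hmono hself roots PySem.Set.empty r hr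
    | step hab hc ih =>
      exact pvFold_closed g F hmono hclosed roots PySem.Set.empty (fun x hx => absurd hx (by simp [PySem.Set.empty]))
        _ ih _ hc

-- ---- graph-build facts under Pre_ ----

lemma pvBuild_getD_sub (nodes : List Int) (lines : List (Int × Int))
    (hl : ∀ l ∈ lines, l.1 ∈ nodes ∧ l.2 ∈ nodes) :
    ∀ k x, x ∈ (pvBuildGraph nodes lines).getD k [] → x ∈ nodes := by
  unfold pvBuildGraph
  have hinit : ∀ k, (nodes.foldl (fun g n => g.insert n ([] : List Int)) PySem.Dict.empty).getD k []
      = [] := by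
    have : ∀ (ns : List Int) (d : PySem.Dict Int (List Int)),
        (∀ k, d.getD k [] = []) → ∀ k, (ns.foldl (fun g n => g.insert n ([] : List Int)) d).getD k [] = [] := by
      intro ns
      induction ns with
      | nil => exact fun d hd => hd
      | cons n rest ih =>
        intro d hd
        refine ih _ (fun k => ?_)
        rw [PySem.Dict.getD_insert]
        split_ifs with h
        · rfl
        · exact hd k
    exact this nodes PySem.Dict.empty (fun k => PySem.Dict.getD_empty k [])
  have hstep : ∀ (ls : List (Int × Int)) (d : PySem.Dict Int (List Int)),
      (∀ l ∈ ls, l.1 ∈ nodes ∧ l.2 ∈ nodes) →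
      (∀ k x, x ∈ d.getD k [] → x ∈ nodes) →
      ∀ k x, x ∈ (ls.foldl (fun g l =>
          (g.modify l.1 [] (fun a => a ++ [l.2])).modify l.2 [] (fun a => a ++ [l.1])) d).getD k [] →
        x ∈ nodes := by
    intro ls
    induction ls with
    | nil => exact fun d _ hd => hd
    | cons l rest ih =>
      intro d hls hd
      refine ih _ (fun l' hl' => hls l' (List.mem_cons_of_mem _ hl')) ?_
      intro k x hx
      rw [PySem.Dict.getD_modify] at hx
      split_ifs at hx with h2
      · rcases List.mem_append.1 hx with hx' | hx'
        · rw [PySem.Dict.getD_modify] at hx'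
          split_ifs at hx' with h1
          · rcases List.mem_append.1 hx' with hx'' | hx''
            · exact hd _ x hx''
            · rw [List.mem_singleton.1 hx'']; exact (hls l List.mem_cons_self).2
          · exact hd _ x hx'
        · rw [List.mem_singleton.1 hx']; exact (hls l List.mem_cons_self).1
      · rw [PySem.Dict.getD_modify] at hx
        split_ifs at hx with h1
        · rcases List.mem_append.1 hx with hx' | hx'
          · exact hd _ x hx'
          · rw [List.mem_singleton.1 hx']; exact (hls l List.mem_cons_self).2
        · exact hd k x hx
  exact hstep lines _ hl (fun k x hx => by rw [hinit k] at hx; cases hx)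

lemma pvBuild_mem_keys (nodes : List Int) (lines : List (Int × Int)) :
    ∀ k ∈ nodes, k ∈ (pvBuildGraph nodes lines).keys := by
  unfold pvBuildGraph
  have hinit : ∀ k ∈ nodes,
      k ∈ (nodes.foldl (fun g n => g.insert n ([] : List Int)) PySem.Dict.empty).keys := by
    intro k hk
    rw [show (fun (g : PySem.Dict Int (List Int)) (n : Int) => g.insert n ([] : List Int))
          = fun g n => g.insert n ((fun (_ : PySem.Dict Int (List Int)) (_ : Int) => ([] : List Int)) g n) from rfl,
        PySem.Dict.keys_foldl_insert, PySem.Dict.keys_empty, PySem.Set.update_nil_left]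
    exact (PySem.Set.mem_ofList _ _).2 hk
  have hstep : ∀ (ls : List (Int × Int)) (d : PySem.Dict Int (List Int)) (k : Int),
      k ∈ d.keys →
      k ∈ (ls.foldl (fun g l =>
          (g.modify l.1 [] (fun a => a ++ [l.2])).modify l.2 [] (fun a => a ++ [l.1])) d).keys := by
    intro ls
    induction ls with
    | nil => exact fun d k hk => hk
    | cons l rest ih =>
      intro d k hk
      refine ih _ k ?_
      rw [← PySem.Dict.contains_iff_mem_keys]
      rw [PySem.Dict.contains_modify, PySem.Dict.contains_modify]
      have := (PySem.Dict.contains_iff_mem_keys d k).2 hk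
      simp [this]
  exact fun k hk => hstep lines _ k (hinit k hk)

-- ===== VERDICT (by name: the statement is the Claim_ definition above) =====
theorem remove_unconnected_nodes_spec : Claim_equal_remove_unconnected_nodes := by
  intro nodes lines roots _ hpre
  unfold Spec_remove_unconnected_nodes
  simp only [remove_unconnected_nodes, remove_unconnected_nodes_alt]
  set g := pvBuildGraph nodes lines with hg
  have hclosed : pvClosedG g := by
    intro k x hx
    exact pvBuild_mem_keys nodes lines x (pvBuild_getD_sub nodes lines hpre.1 k x hx)
  set FA := fun (v : PySem.Set Int) (root : Int) =>
    if PySem.Set.contains v root then v else pvDfsA g g.size root v with hFA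
  set FB := fun (v : PySem.Set Int) (root : Int) =>
    if PySem.Set.contains v root then v else pvStackLoop g [root] v with hFB
  have hmemA := pvFold_mem g FA
    (by
      intro v r a ha
      simp only [hFA]
      split_ifs with hc
      · exact ha
      · exact ((pvDfsA_mono g g.size).1 r v).1 ha)
    (by
      intro v r
      simp only [hFA]
      split_ifs with hc
      · exact (PySem.Set.contains_iff _ _).1 hc
      · exact ((pvDfsA_mono g g.size).1 r v).2)
    (by
      intro v r x hx
      simp only [hFA] at hx
      split_ifs at hx with hc
      · exact Or.inl hx
      · exact (pvDfsA_sound g g.size).1 r v x hx)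
    (by
      intro v r x hx
      simp only [hFA] at hx ⊢
      split_ifs at hx ⊢ with hc
      · exact Or.inl hx
      · exact (pvDfsA_closed g hclosed g.size).1 r v (pvUnvis_le_size g _) x hx)
    roots
  have hmemB := pvFold_mem g FB
    (by
      intro v r a ha
      simp only [hFB]
      split_ifs with hc
      · exact ha
      · exact pvStackLoop_mono g [r] v ha)
    (by
      intro v r
      simp only [hFB]
      split_ifs with hc
      · exact (PySem.Set.contains_iff _ _).1 hc
      · exact pvStackLoop_stack g [r] v r List.mem_cons_self)
    (by
      intro v r x hx
      simp only [hFB] at hx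
      split_ifs at hx with hc
      · exact Or.inl hx
      · rcases pvStackLoop_sound g [r] v x hx with h | ⟨s, hs, hr⟩
        · exact Or.inl h
        · rw [List.mem_singleton.1 hs] at hr
          exact Or.inr hr)
    (by
      intro v r x hx
      simp only [hFB] at hx ⊢
      split_ifs at hx ⊢ with hc
      · exact Or.inl hx
      · exact pvStackLoop_closed g [r] v x hx)
    roots
  have hiff : ∀ x, x ∈ roots.foldl FA PySem.Set.empty ↔ x ∈ roots.foldl FB PySem.Set.empty := by
    intro x
    rw [hmemA x, hmemB x]
  have hcont : ∀ x, PySem.Set.contains (roots.foldl FA PySem.Set.empty) x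
      = PySem.Set.contains (roots.foldl FB PySem.Set.empty) x := by
    intro x
    rw [Bool.eq_iff_iff, PySem.Set.contains_iff, PySem.Set.contains_iff]
    exact hiff x
  have h1 : nodes.filter (fun node => PySem.Set.contains (roots.foldl FA PySem.Set.empty) node)
      = nodes.filter (fun node => PySem.Set.contains (roots.foldl FB PySem.Set.empty) node) :=
    List.filter_congr (fun n _ => hcont n)
  have h2 : lines.filter (fun l => PySem.Set.contains (roots.foldl FA PySem.Set.empty) l.1
        && PySem.Set.contains (roots.foldl FA PySem.Set.empty) l.2)
      = lines.filter (fun l => PySem.Set.contains (roots.foldl FB PySem.Set.empty) l.1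
        && PySem.Set.contains (roots.foldl FB PySem.Set.empty) l.2) :=
    List.filter_congr (fun l _ => by rw [hcont l.1, hcont l.2])
  rw [Prod.mk.injEq]
  exact ⟨h1, h2⟩
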